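-- pv_equiv track=rewrite | github.com/baiwan-chenhao/rewrite | leetcode_gen_week2.py | solve
-- ===== SOURCE A (Python) =====
-- from typing import List, Tuple
--
-- def solve(nums: List[int]) -> int:
--     diff = [0] * (len(nums) + 1)
--     for i, num in enumerate(nums):
--         diff[max(i - num, 0)] += 1
--         diff[i + 1] -= 1
--
--     ans = sd = 0
--     for x, d in zip(nums, diff):
--         sd += d
--         ans += x * sd
--     return ans
-- ===== SOURCE B (Python) =====
-- def solve(nums):
--     P = [0]
--     for x in nums:
--         P.append(P[-1] + x)
--     return sum(P[i + 1] - P[max(i - num, 0)] for i, num in enumerate(nums))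
-- ===== Notes on version B (the rewrite author's own statement) =====
-- stated objective: simpler
-- what changed: B builds a prefix-sum array once and adds the direct range sum P[i+1]-P[max(i-num,0)] per element, replacing A's difference-array range updates followed by a running-count weighted sum.
import Mathlib
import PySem

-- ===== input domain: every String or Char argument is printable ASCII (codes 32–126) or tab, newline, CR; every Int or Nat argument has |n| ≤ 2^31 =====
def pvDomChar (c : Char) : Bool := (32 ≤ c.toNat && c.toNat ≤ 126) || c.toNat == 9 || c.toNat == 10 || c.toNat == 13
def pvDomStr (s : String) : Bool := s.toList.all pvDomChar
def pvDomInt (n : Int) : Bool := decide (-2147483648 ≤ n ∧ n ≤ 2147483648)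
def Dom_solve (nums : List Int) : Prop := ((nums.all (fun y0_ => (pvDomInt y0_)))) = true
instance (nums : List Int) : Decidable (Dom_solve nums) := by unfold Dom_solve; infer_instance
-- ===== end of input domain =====

-- B replaces A's difference-array + running weighted sum with a prefix-sum array and one
-- direct range query per element (objective: simpler / more direct; same asymptotic cost).

-- ===== PORT A =====
-- diff[idx] += 1 / diff[i+1] -= 1 port to List.modify at the (nonnegative) index; where the
-- Python index exceeds len(diff) Python raises IndexError — those inputs are outside Pre_solve.
def solve (nums : List Int) : Int :=
  let diff := (PySem.List.enumerate nums).foldl (fun diff p =>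
      let diff := diff.modify ((max (p.1 - p.2) 0).toNat) (· + 1)
      diff.modify (p.1 + 1).toNat (· + (-1)))
    (List.replicate (nums.length + 1) 0)
  let r := (nums.zip diff).foldl (fun (acc : Int × Int) p =>
      (acc.1 + p.1 * (acc.2 + p.2), acc.2 + p.2)) (0, 0)
  r.1

-- ===== PORT B =====
-- P[-1] ports to pyGetD P (-1); P[k] reads port to getD (in range for every input in Pre_solve).
def solve_alt (nums : List Int) : Int :=
  let P := nums.foldl (fun (P : List Int) x => P ++ [PySem.List.pyGetD P (-1) 0 + x]) [0]
  ((PySem.List.enumerate nums).map (fun p =>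
      P.getD (p.1 + 1).toNat 0 - P.getD (max (p.1 - p.2) 0).toNat 0)).sum

-- ===== PRECONDITION & SPEC =====
-- Pre_solve excludes exactly the inputs where the Python A raises IndexError
-- (some i - nums[i] > len(nums), i.e. a sufficiently negative element); B raises there too.
def Pre_solve (nums : List Int) : Prop :=
  ∀ i < nums.length, (i : Int) - nums.getD i 0 ≤ (nums.length : Int)
instance (nums : List Int) : Decidable (Pre_solve nums) := by unfold Pre_solve; infer_instance

def pvWitness_solve : List Int := [1, -2, 3]

def Spec_solve (nums : List Int) (out : Int) : Prop := out = solve_alt nums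
instance (nums : List Int) (out : Int) : Decidable (Spec_solve nums out) := by unfold Spec_solve; infer_instance

-- ===== CLAIM (what is proved, stated in full; the proofs are below) =====
def Claim_equal_solve : Prop := ∀ (nums : List Int), Dom_solve nums → Pre_solve nums → Spec_solve nums (solve nums)

-- ===== LEMMAS AND PROOFS =====

-- prefix sum of the first k elements
def preS (nums : List Int) (k : Nat) : Int := ∑ j ∈ Finset.range k, nums.getD j 0
-- left end of element i's range, as a Nat
def Lx (nums : List Int) (i : Nat) : Nat := (max ((i : Int) - nums.getD i 0) 0).toNat

theorem enum_eq (nums : List Int) :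
    PySem.List.enumerate nums
      = (List.range nums.length).map (fun i => (((i : Nat) : Int), nums.getD i 0)) := by
  apply List.ext_getElem?
  intro k
  rw [PySem.List.getElem?_enumerate]
  by_cases h : k < nums.length
  · simp [List.getElem?_map, List.getElem?_range h, List.getElem?_eq_getElem h,
      List.getD_eq_getElem?_getD]
  · rw [List.getElem?_eq_none (by omega), List.getElem?_map,
      List.getElem?_eq_none (by simpa using (by omega : nums.length ≤ k))]
    rfl

theorem getD_modify (l : List Int) (i k : Nat) (f : Int → Int) (hk : k < l.length) :
    (l.modify i f).getD k 0 = if i = k then f (l.getD k 0) else l.getD k 0 := by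
  simp [List.getD_eq_getElem?_getD, List.getElem?_modify]
  split <;> simp [List.getElem?_eq_getElem hk]

def diffStep (d : List Int) (p : Int × Int) : List Int :=
  (d.modify ((max (p.1 - p.2) 0).toNat) (· + 1)).modify (p.1 + 1).toNat (· + (-1))

theorem length_foldl_diffStep (ps : List (Int × Int)) (d : List Int) :
    (ps.foldl diffStep d).length = d.length := by
  induction ps generalizing d with
  | nil => rfl
  | cons p ps ih => simp [ih, diffStep]

theorem diff_getD (ps : List (Int × Int)) (d : List Int) (k : Nat) (hk : k < d.length) :
    (ps.foldl diffStep d).getD k 0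
      = d.getD k 0 + (ps.map (fun p =>
          (if (max (p.1 - p.2) 0).toNat = k then (1 : Int) else 0)
          + (if (p.1 + 1).toNat = k then (-1 : Int) else 0))).sum := by
  induction ps generalizing d with
  | nil => simp
  | cons p ps ih =>
    rw [List.foldl_cons, ih _ (by simp [diffStep, hk]), List.map_cons, List.sum_cons]
    have h1 : (diffStep d p).getD k 0
        = d.getD k 0 + ((if (max (p.1 - p.2) 0).toNat = k then (1 : Int) else 0)
          + (if (p.1 + 1).toNat = k then (-1 : Int) else 0)) := by
      unfold diffStep
      rw [getD_modify _ _ _ _ (by simpa using hk), getD_modify _ _ _ _ hk]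
      split <;> split <;> ring
    rw [h1]; ring

theorem loop2 (xs ds : List Int) (a s : Int) :
    ((xs.zip ds).foldl (fun (acc : Int × Int) p =>
        (acc.1 + p.1 * (acc.2 + p.2), acc.2 + p.2)) (a, s)).1
      = a + ∑ j ∈ Finset.range (min xs.length ds.length),
          xs.getD j 0 * (s + ∑ k ∈ Finset.range (j + 1), ds.getD k 0) := by
  induction xs generalizing ds a s with
  | nil => simp
  | cons x xs ih =>
    cases ds with
    | nil => simp
    | cons d ds =>
      rw [List.zip_cons_cons, List.foldl_cons, ih]
      have hmin : min (x :: xs).length (d :: ds).length = min xs.length ds.length + 1 := by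
        simp
      rw [hmin, Finset.sum_range_succ']
      have hterm : ∀ j, (x :: xs).getD (j + 1) 0 * (s + ∑ k ∈ Finset.range (j + 1 + 1), (d :: ds).getD k 0)
          = xs.getD j 0 * ((s + d) + ∑ k ∈ Finset.range (j + 1), ds.getD k 0) := by
        intro j
        rw [Finset.sum_range_succ']
        simp only [List.getD_cons_succ, List.getD_cons_zero]
        ring
      simp only [hterm]
      rw [Finset.sum_range_one]
      simp only [List.getD_cons_zero]
      ring

theorem preS_append (xs : List Int) (x : Int) (k : Nat) (hk : k ≤ xs.length) :
    preS (xs ++ [x]) k = preS xs k := by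
  unfold preS
  refine Finset.sum_congr rfl ?_
  intro j hj
  exact List.getD_append _ _ _ _ (by have := Finset.mem_range.mp hj; omega)

theorem buildP_eq (nums : List Int) :
    nums.foldl (fun (P : List Int) x => P ++ [PySem.List.pyGetD P (-1) 0 + x]) [0]
      = (List.range (nums.length + 1)).map (preS nums) := by
  induction nums using List.reverseRecOn with
  | nil => simp [preS]
  | append_singleton xs x ih =>
    rw [List.foldl_append, ih, List.foldl_cons, List.foldl_nil]
    have hlast : PySem.List.pyGetD ((List.range (xs.length + 1)).map (preS xs)) (-1) 0
        = preS xs xs.length := by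
      rw [List.range_succ, List.map_append, List.map_cons, List.map_nil,
        PySem.List.pyGetD_neg_one_append_singleton]
    have hnew : preS (xs ++ [x]) (xs.length + 1) = preS xs xs.length + x := by
      unfold preS
      rw [Finset.sum_range_succ]
      congr 1
      · refine Finset.sum_congr rfl ?_
        intro j hj
        exact List.getD_append _ _ _ _ (by have := Finset.mem_range.mp hj; omega)
      · rw [List.getD_eq_getElem?_getD]
        simp
    have key : (List.range ((xs ++ [x]).length + 1)).map (preS (xs ++ [x]))
        = (List.range (xs.length + 1)).map (preS xs) ++ [preS xs xs.length + x] := by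
      rw [show (xs ++ [x]).length + 1 = (xs.length + 1) + 1 from by simp,
        List.range_succ, List.map_append, List.map_cons, List.map_nil]
      congr 1
      · refine List.map_congr_left ?_
        intro k hk
        exact preS_append xs x k (by have := List.mem_range.mp hk; omega)
      · rw [show xs.length + 1 = (xs ++ [x]).length from by simp] at hnew ⊢
        rw [hnew]
    rw [key, hlast]

theorem sum_ite_le (c n : Nat) (f : Nat → Int) (h : c ≤ n) :
    ∑ j ∈ Finset.range n, (if c ≤ j then f j else 0)
      = (∑ j ∈ Finset.range n, f j) - ∑ j ∈ Finset.range c, f j := by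
  rw [← Finset.sum_Ico_eq_sub _ h, Finset.range_eq_Ico, ← Finset.sum_filter]
  congr 1
  ext j
  simp
  omega

theorem core (nums : List Int) (hpre : ∀ i < nums.length, Lx nums i ≤ nums.length) :
    ∑ j ∈ Finset.range nums.length, nums.getD j 0 *
        (∑ i ∈ Finset.range nums.length,
          ((if Lx nums i ≤ j then (1 : Int) else 0) + (if i + 1 ≤ j then (-1 : Int) else 0)))
      = ∑ i ∈ Finset.range nums.length, (preS nums (i + 1) - preS nums (Lx nums i)) := by
  have hdist : ∀ j, nums.getD j 0 *
        (∑ i ∈ Finset.range nums.length,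
          ((if Lx nums i ≤ j then (1 : Int) else 0) + (if i + 1 ≤ j then (-1 : Int) else 0)))
      = ∑ i ∈ Finset.range nums.length,
          ((if Lx nums i ≤ j then nums.getD j 0 else 0) + (if i + 1 ≤ j then -nums.getD j 0 else 0)) := by
    intro j
    rw [Finset.mul_sum]
    refine Finset.sum_congr rfl ?_
    intro i _
    split <;> split <;> ring
  simp only [hdist]
  rw [Finset.sum_comm]
  refine Finset.sum_congr rfl ?_
  intro i hi
  rw [Finset.mem_range] at hi
  rw [Finset.sum_add_distrib, sum_ite_le _ _ _ (hpre i hi)]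
  have h2 : ∑ j ∈ Finset.range nums.length, (if i + 1 ≤ j then -nums.getD j 0 else 0)
      = (∑ j ∈ Finset.range nums.length, -nums.getD j 0) - ∑ j ∈ Finset.range (i + 1), -nums.getD j 0 := by
    exact sum_ite_le (i + 1) nums.length (fun j => -nums.getD j 0) (by omega)
  rw [h2]
  unfold preS
  rw [Finset.sum_neg_distrib, Finset.sum_neg_distrib]
  ring

theorem sum_ite_eq_lt (t m : Nat) (c : Int) :
    ∑ k ∈ Finset.range m, (if t = k then c else 0) = if t < m then c else 0 := by
  simp [Finset.sum_ite_eq, Finset.mem_range]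

-- A's value as a double sum over the diff contributions
theorem solve_eq_sum (nums : List Int) :
    solve nums = ∑ j ∈ Finset.range nums.length, nums.getD j 0 *
        (∑ k ∈ Finset.range (j + 1),
          ∑ i ∈ Finset.range nums.length,
            ((if Lx nums i = k then (1 : Int) else 0)
              + (if i + 1 = k then (-1 : Int) else 0))) := by
  have h0 : solve nums = ((nums.zip
        (((List.range nums.length).map (fun i => (((i : Nat) : Int), nums.getD i 0))).foldl
          diffStep (List.replicate (nums.length + 1) 0))).foldl
      (fun (acc : Int × Int) p => (acc.1 + p.1 * (acc.2 + p.2), acc.2 + p.2)) (0, 0)).1 := by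
    simp only [solve]
    rw [enum_eq]
    rfl
  set D := ((List.range nums.length).map (fun i => (((i : Nat) : Int), nums.getD i 0))).foldl
      diffStep (List.replicate (nums.length + 1) 0) with hDdef
  have hlen : D.length = nums.length + 1 := by
    rw [hDdef, length_foldl_diffStep, List.length_replicate]
  have hD : ∀ k < nums.length + 1, D.getD k 0
      = ∑ i ∈ Finset.range nums.length,
          ((if Lx nums i = k then (1 : Int) else 0) + (if i + 1 = k then (-1 : Int) else 0)) := by
    intro k hk
    rw [hDdef, diff_getD _ _ _ (by simpa using hk), List.getD_replicate _ hk, List.map_map]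
    have hsum : (((List.range nums.length).map ((fun p : Int × Int =>
          (if (max (p.1 - p.2) 0).toNat = k then (1 : Int) else 0)
          + (if (p.1 + 1).toNat = k then (-1 : Int) else 0)) ∘
        (fun i => (((i : Nat) : Int), nums.getD i 0))))).sum
        = ∑ i ∈ Finset.range nums.length, ((fun p : Int × Int =>
          (if (max (p.1 - p.2) 0).toNat = k then (1 : Int) else 0)
          + (if (p.1 + 1).toNat = k then (-1 : Int) else 0)) ∘
        (fun i => (((i : Nat) : Int), nums.getD i 0))) i := rfl
    rw [hsum, zero_add]
    refine Finset.sum_congr rfl ?_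
    intro i _
    have ht : (((i : Nat) : Int) + 1).toNat = i + 1 := by omega
    simp only [Function.comp, Lx, ht]
    rfl
  rw [h0, loop2]
  rw [zero_add]
  have hmin : min nums.length D.length = nums.length := by omega
  rw [hmin]
  refine Finset.sum_congr rfl ?_
  intro j hj
  have hj' := Finset.mem_range.mp hj
  congr 1
  rw [zero_add]
  refine Finset.sum_congr rfl ?_
  intro k hk
  exact hD k (by have := Finset.mem_range.mp hk; omega)

-- B's value as a sum of prefix-sum differences (uses Pre_ : all left ends in range)
theorem solve_alt_eq (nums : List Int) (hpre : ∀ i < nums.length, Lx nums i ≤ nums.length) :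
    solve_alt nums = ∑ i ∈ Finset.range nums.length,
      (preS nums (i + 1) - preS nums (Lx nums i)) := by
  simp only [solve_alt]
  rw [buildP_eq, enum_eq, List.map_map]
  have hsum : (((List.range nums.length).map ((fun p : Int × Int =>
        ((List.range (nums.length + 1)).map (preS nums)).getD (p.1 + 1).toNat 0
        - ((List.range (nums.length + 1)).map (preS nums)).getD (max (p.1 - p.2) 0).toNat 0) ∘
      (fun i => (((i : Nat) : Int), nums.getD i 0))))).sum
      = ∑ i ∈ Finset.range nums.length, ((fun p : Int × Int =>
        ((List.range (nums.length + 1)).map (preS nums)).getD (p.1 + 1).toNat 0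
        - ((List.range (nums.length + 1)).map (preS nums)).getD (max (p.1 - p.2) 0).toNat 0) ∘
      (fun i => (((i : Nat) : Int), nums.getD i 0))) i := rfl
  rw [hsum]
  refine Finset.sum_congr rfl ?_
  intro i hi
  have hi' := Finset.mem_range.mp hi
  have ht : (((i : Nat) : Int) + 1).toNat = i + 1 := by omega
  simp only [Function.comp, ht]
  rw [PySem.List.getD_map_range _ _ _ _ (by omega),
    PySem.List.getD_map_range _ _ _ _ (by have := hpre i hi'; simp [Lx] at this ⊢; omega)]
  rfl

-- ===== VERDICT (by name: the statement is the Claim_ definition above) =====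
theorem solve_spec : Claim_equal_solve := by
  intro nums _ hpre
  have hL : ∀ i < nums.length, Lx nums i ≤ nums.length := by
    intro i hi
    have := hpre i hi
    simp only [Lx]
    omega
  show solve nums = solve_alt nums
  rw [solve_eq_sum, solve_alt_eq nums hL, ← core nums hL]
  refine Finset.sum_congr rfl ?_
  intro j hj
  congr 1
  rw [Finset.sum_comm]
  refine Finset.sum_congr rfl ?_
  intro i _
  rw [Finset.sum_add_distrib, sum_ite_eq_lt, sum_ite_eq_lt]
  simp only [Nat.lt_succ_iff]
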